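-- pv_equiv track=rewrite | github.com/eleunadeu/code_test | test2.py | bfa_upgrade
-- ===== SOURCE A (Python) =====
-- def bfa_upgrade(total_heads, total_legs):
--   '''
--   i: 다리 2개인 동물 수, j: 다리 4개인 동물 수, k: 다리 8개인 동물 수
--   '''
--   result = []
--   for k in range(total_heads+1):
--     for i in range(total_heads-k+1):
--       j = total_heads - k - i
--       sum_legs = 2*i + 4*j + 8*k
--       if sum_legs == total_legs:
--         result.append((i,j,k))
--   return(result)
-- ===== SOURCE B (Python) =====
-- def bfa_upgrade(total_heads, total_legs):
--   # O(n): for each k, solve the linear system directly instead of scanning all i.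
--   result = []
--   for k in range(total_heads + 1):
--     t = 4 * total_heads + 4 * k - total_legs   # = 2*i forced by the head/leg equations
--     if t % 2 == 0:
--       i = t // 2
--       if 0 <= i <= total_heads - k:
--         result.append((i, total_heads - k - i, k))
--   return result
-- ===== Notes on version B (the rewrite author's own statement) =====
-- stated objective: faster
-- what changed: B drops A's inner scan over i: for each k it solves 2i+4j+8k=legs with i+j=heads-k in closed form (i=(4*heads+4k-legs)/2), checking integrality and bounds.
import Mathlib
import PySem

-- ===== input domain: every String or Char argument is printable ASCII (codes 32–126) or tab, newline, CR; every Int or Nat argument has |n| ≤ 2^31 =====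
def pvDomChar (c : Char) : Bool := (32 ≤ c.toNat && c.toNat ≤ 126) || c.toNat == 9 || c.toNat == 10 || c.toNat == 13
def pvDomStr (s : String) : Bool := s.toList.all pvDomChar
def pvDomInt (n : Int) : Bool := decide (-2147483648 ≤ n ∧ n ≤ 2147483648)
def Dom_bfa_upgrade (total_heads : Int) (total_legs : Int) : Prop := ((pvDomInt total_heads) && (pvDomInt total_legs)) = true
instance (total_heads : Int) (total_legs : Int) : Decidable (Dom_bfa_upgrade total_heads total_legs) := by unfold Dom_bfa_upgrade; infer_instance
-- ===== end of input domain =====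

-- B replaces A's inner scan over i by solving the linear system per k in closed form (objective: faster, O(n) vs O(n^2)).

-- ===== PORT A =====
def bfa_upgrade (total_heads : Int) (total_legs : Int) : List (List Int) :=
  (PySem.List.pyRange 0 (total_heads + 1) 1).foldl (fun result k =>
    (PySem.List.pyRange 0 (total_heads - k + 1) 1).foldl (fun result i =>
      let j := total_heads - k - i
      let sum_legs := 2 * i + 4 * j + 8 * k
      if sum_legs = total_legs then result ++ [[i, j, k]] else result) result) []

-- ===== PORT B =====
def bfa_upgrade_alt (total_heads : Int) (total_legs : Int) : List (List Int) :=
  (PySem.List.pyRange 0 (total_heads + 1) 1).foldl (fun result k =>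
    let t := 4 * total_heads + 4 * k - total_legs
    if PySem.Int.mod t 2 = 0 then
      let i := PySem.Int.floordiv t 2
      if 0 ≤ i ∧ i ≤ total_heads - k then
        result ++ [[i, total_heads - k - i, k]]
      else result
    else result) []

-- ===== PRECONDITION & SPEC =====
def Spec_bfa_upgrade (total_heads : Int) (total_legs : Int) (out : List (List Int)) : Prop := out = bfa_upgrade_alt total_heads total_legs
instance (total_heads : Int) (total_legs : Int) (out : List (List Int)) : Decidable (Spec_bfa_upgrade total_heads total_legs out) := by unfold Spec_bfa_upgrade; infer_instance

-- ===== CLAIM (what is proved, stated in full; the proofs are below) =====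
def Claim_equal_bfa_upgrade : Prop := ∀ (total_heads : Int) (total_legs : Int), Dom_bfa_upgrade total_heads total_legs → Spec_bfa_upgrade total_heads total_legs (bfa_upgrade total_heads total_legs)

-- ===== LEMMAS AND PROOFS =====

-- filtering a 0-based range by a predicate true at exactly one point c
lemma filter_range_single (p : Int → Bool) (c : Int) (n : Nat)
    (hc : ∀ i : Int, p i = true ↔ i = c) :
    ((List.range n).map (fun k : Nat => (k : Int))).filter p
      = if 0 ≤ c ∧ c < (n : Int) then [c] else [] := by
  induction n with
  | zero =>
    rw [if_neg (by intro hcon; omega)]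
    simp
  | succ m ih =>
    rw [List.range_succ]
    simp only [List.map_append, List.filter_append, ih, List.map_cons, List.map_nil,
      List.filter_cons, List.filter_nil]
    by_cases h : ((m : Int)) = c
    · have hp : p (m : Int) = true := (hc _).mpr h
      rw [hp]
      subst h
      have hcnd : (0:Int) ≤ (m : Int) ∧ (m : Int) < ((m + 1 : Nat) : Int) :=
        ⟨by omega, by omega⟩
      rw [if_neg (by intro hcon; omega), if_pos hcnd]
      simp
    · have hp : p (m : Int) = false := by
        cases h' : p (m : Int) with
        | false => rfl
        | true => exact absurd ((hc _).mp h') h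
      rw [hp]
      simp only [Bool.false_eq_true, if_false, List.append_nil]
      by_cases hcm : 0 ≤ c ∧ c < ((m : Nat) : Int)
      · rw [if_pos hcm, if_pos (by push_cast at *; omega)]
      · rw [if_neg hcm, if_neg (by push_cast at *; omega)]

lemma filter_pyRange_single (p : Int → Bool) (c b : Int)
    (hc : ∀ i : Int, p i = true ↔ i = c) :
    ((PySem.List.pyRange 0 b 1).filter p) = if 0 ≤ c ∧ c < b then [c] else [] := by
  rw [PySem.List.pyRange_one]
  simp only [zero_add]
  rw [filter_range_single p c (b - 0).toNat hc]
  split_ifs with h1 h2 <;> first | rfl | omega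

-- per-k: A's inner scan produces exactly B's closed-form candidate
lemma inner_eq (H L k : Int) :
    (((PySem.List.pyRange 0 (H - k + 1) 1).filter
        (fun i => decide (2 * i + 4 * (H - k - i) + 8 * k = L))).map
      (fun i => [i, H - k - i, k]))
    = (if PySem.Int.mod (4 * H + 4 * k - L) 2 = 0 then
        if 0 ≤ PySem.Int.floordiv (4 * H + 4 * k - L) 2 ∧
            PySem.Int.floordiv (4 * H + 4 * k - L) 2 ≤ H - k then
          [[PySem.Int.floordiv (4 * H + 4 * k - L) 2,
            H - k - PySem.Int.floordiv (4 * H + 4 * k - L) 2, k]]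
        else []
       else []) := by
  set t := 4 * H + 4 * k - L with ht
  by_cases hdvd : (2 : Int) ∣ t
  · obtain ⟨c, hcval⟩ := hdvd
    have hmod : PySem.Int.mod t 2 = 0 := (PySem.Int.mod_eq_zero_iff_dvd t 2).mpr ⟨c, hcval⟩
    have hdiv : PySem.Int.floordiv t 2 = c := by
      rw [PySem.Int.floordiv_eq_ediv_of_pos (by norm_num : (0:Int) < 2)]
      omega
    have hfilter := filter_pyRange_single
      (fun i => decide (2 * i + 4 * (H - k - i) + 8 * k = L)) c (H - k + 1)
      (by intro i; simp only [decide_eq_true_eq]; omega)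
    rw [hfilter, hmod, if_pos rfl, hdiv]
    split_ifs with h1 h2
    · simp
    · omega
    · omega
    · simp
  · have hmod : PySem.Int.mod t 2 ≠ 0 := by
      intro h; exact hdvd ((PySem.Int.mod_eq_zero_iff_dvd t 2).mp h)
    rw [if_neg hmod]
    have hnil : ((PySem.List.pyRange 0 (H - k + 1) 1).filter
        (fun i => decide (2 * i + 4 * (H - k - i) + 8 * k = L))) = [] := by
      rw [List.filter_eq_nil_iff]
      intro i _ hi
      simp only [decide_eq_true_eq] at hi
      omega
    rw [hnil, List.map_nil]

-- ===== VERDICT (by name: the statement is the Claim_ definition above) =====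
theorem bfa_upgrade_spec : Claim_equal_bfa_upgrade := by
  intro H L _
  unfold Spec_bfa_upgrade bfa_upgrade bfa_upgrade_alt
  have hA : (PySem.List.pyRange 0 (H + 1) 1).foldl (fun result k =>
      (PySem.List.pyRange 0 (H - k + 1) 1).foldl (fun result i =>
        let j := H - k - i
        let sum_legs := 2 * i + 4 * j + 8 * k
        if sum_legs = L then result ++ [[i, j, k]] else result) result) []
    = (PySem.List.pyRange 0 (H + 1) 1).flatMap (fun k =>
        ((PySem.List.pyRange 0 (H - k + 1) 1).filter
          (fun i => decide (2 * i + 4 * (H - k - i) + 8 * k = L))).map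
        (fun i => [i, H - k - i, k])) := by
    rw [PySem.List.foldl_congr_mem _ _
      (fun result k => result ++
        ((PySem.List.pyRange 0 (H - k + 1) 1).filter
          (fun i => decide (2 * i + 4 * (H - k - i) + 8 * k = L))).map
        (fun i => [i, H - k - i, k])) _
      (by intro acc k _
          rw [show (fun (result : List (List Int)) (i : Int) =>
                let j := H - k - i
                let sum_legs := 2 * i + 4 * j + 8 * k
                if sum_legs = L then result ++ [[i, j, k]] else result)
              = (fun (acc : List (List Int)) (x : Int) =>
                  if decide (2 * x + 4 * (H - k - x) + 8 * k = L) = true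
                  then acc ++ [[x, H - k - x, k]] else acc) from by
            funext a x
            simp only [decide_eq_true_eq]]
          exact PySem.List.foldl_append_if
            (fun i => decide (2 * i + 4 * (H - k - i) + 8 * k = L))
            (fun i => [i, H - k - i, k]) _ _),
      PySem.List.foldl_append_eq_flatMap, List.nil_append]
  have hB : (PySem.List.pyRange 0 (H + 1) 1).foldl (fun result k =>
      let t := 4 * H + 4 * k - L
      if PySem.Int.mod t 2 = 0 then
        let i := PySem.Int.floordiv t 2
        if 0 ≤ i ∧ i ≤ H - k then result ++ [[i, H - k - i, k]] else result
      else result) []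
    = (PySem.List.pyRange 0 (H + 1) 1).flatMap (fun k =>
        if PySem.Int.mod (4 * H + 4 * k - L) 2 = 0 then
          if 0 ≤ PySem.Int.floordiv (4 * H + 4 * k - L) 2 ∧
              PySem.Int.floordiv (4 * H + 4 * k - L) 2 ≤ H - k then
            [[PySem.Int.floordiv (4 * H + 4 * k - L) 2,
              H - k - PySem.Int.floordiv (4 * H + 4 * k - L) 2, k]]
          else []
        else []) := by
    rw [PySem.List.foldl_congr_mem _ _
      (fun result k => result ++
        (if PySem.Int.mod (4 * H + 4 * k - L) 2 = 0 then
          if 0 ≤ PySem.Int.floordiv (4 * H + 4 * k - L) 2 ∧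
              PySem.Int.floordiv (4 * H + 4 * k - L) 2 ≤ H - k then
            [[PySem.Int.floordiv (4 * H + 4 * k - L) 2,
              H - k - PySem.Int.floordiv (4 * H + 4 * k - L) 2, k]]
          else []
         else [])) _
      (by intro acc k _
          show (if PySem.Int.mod (4 * H + 4 * k - L) 2 = 0 then
                  if 0 ≤ PySem.Int.floordiv (4 * H + 4 * k - L) 2 ∧
                      PySem.Int.floordiv (4 * H + 4 * k - L) 2 ≤ H - k then
                    acc ++ [[PySem.Int.floordiv (4 * H + 4 * k - L) 2,
                      H - k - PySem.Int.floordiv (4 * H + 4 * k - L) 2, k]]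
                  else acc
                else acc)
            = acc ++
              (if PySem.Int.mod (4 * H + 4 * k - L) 2 = 0 then
                if 0 ≤ PySem.Int.floordiv (4 * H + 4 * k - L) 2 ∧
                    PySem.Int.floordiv (4 * H + 4 * k - L) 2 ≤ H - k then
                  [[PySem.Int.floordiv (4 * H + 4 * k - L) 2,
                    H - k - PySem.Int.floordiv (4 * H + 4 * k - L) 2, k]]
                else []
               else [])
          split_ifs <;> simp),
      PySem.List.foldl_append_eq_flatMap, List.nil_append]
  rw [hA, hB]
  exact congrArg (fun f => List.flatMap f (PySem.List.pyRange 0 (H + 1) 1))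
    (funext (fun k => inner_eq H L k))
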